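-- pv_equiv track=rewrite | github.com/randomparity/autoforge | autoforge/perf/profile.py | fold_stacks
-- ===== SOURCE A (Python) =====
-- def _flush_frames(frames: list[str], stacks: dict[str, int]) -> None:
--     """Flush accumulated frames into the folded-stacks dict and clear frames."""
--     if frames:
--         stack_key = ";".join(reversed(frames))
--         stacks[stack_key] = stacks.get(stack_key, 0) + 1
--         frames.clear()
--
-- def fold_stacks(perf_script_output: str) -> dict[str, int]:
--     """Parse perf script output into folded stacks.
--
--     Args:
--         perf_script_output: Raw text from `perf script`.
--
--     Returns:
--         Dict mapping semicolon-delimited stack strings to sample counts.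
--     """
--     stacks: dict[str, int] = {}
--     current_frames: list[str] = []
--
--     for line in perf_script_output.splitlines():
--         stripped = line.strip()
--
--         if not stripped:
--             _flush_frames(current_frames, stacks)
--             continue
--
--         if stripped.startswith(("(", "#")):
--             continue
--
--         # Frame lines start with hex address
--         parts = stripped.split(None, 1)
--         if len(parts) >= 2 and _is_hex(parts[0]):
--             raw = parts[1].split("(")[0].strip()
--             # Strip offset like "+0x20" to get the bare symbol name
--             symbol = raw.split("+")[0] if raw else parts[0]
--             current_frames.append(symbol)
--
--     # Handle last record if no trailing blank line
--     _flush_frames(current_frames, stacks)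
--
--     return stacks
--
-- def _is_hex(s: str) -> bool:
--     try:
--         int(s, 16)
--     except ValueError:
--         return False
--     return True
-- ===== SOURCE B (Python) =====
-- def fold_stacks(perf_script_output: str) -> dict[str, int]:
--     """Parse perf script output into folded stacks (group-then-map decomposition)."""
--     # Phase 1: split the lines into records at whitespace-only lines.
--     records = []
--     block = []
--     for line in perf_script_output.splitlines():
--         if line.strip():
--             block.append(line)
--         else:
--             records.append(block)
--             block = []
--     records.append(block)
--
--     # Phase 2: extract the frame symbols of each record and count folded stacks.
--     stacks: dict[str, int] = {}
--     for record in records: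
--         frames = [s for s in map(_symbol_of, record) if s is not None]
--         if frames:
--             key = ";".join(reversed(frames))
--             stacks[key] = stacks.get(key, 0) + 1
--     return stacks
--
--
-- def _symbol_of(line: str):
--     """Frame symbol of a non-blank perf script line, or None if not a frame line."""
--     stripped = line.strip()
--     if stripped.startswith(("(", "#")):
--         return None
--     parts = stripped.split(None, 1)
--     if len(parts) >= 2 and _is_hex_b(parts[0]):
--         raw = parts[1].split("(")[0].strip()
--         return raw.split("+")[0] if raw else parts[0]
--     return None
--
--
-- def _is_hex_b(s: str) -> bool:
--     try:
--         int(s, 16)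
--     except ValueError:
--         return False
--     return True
-- ===== Notes on version B (the rewrite author's own statement) =====
-- stated objective: alternative
-- what changed: Replaces A's single line loop with a flush-on-boundary frame accumulator by a two-phase group-then-map decomposition: first split the lines into records at whitespace-only lines (with a trailing record), then map each record to its filtered frame symbols and count the folded stack keys.
import Mathlib
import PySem

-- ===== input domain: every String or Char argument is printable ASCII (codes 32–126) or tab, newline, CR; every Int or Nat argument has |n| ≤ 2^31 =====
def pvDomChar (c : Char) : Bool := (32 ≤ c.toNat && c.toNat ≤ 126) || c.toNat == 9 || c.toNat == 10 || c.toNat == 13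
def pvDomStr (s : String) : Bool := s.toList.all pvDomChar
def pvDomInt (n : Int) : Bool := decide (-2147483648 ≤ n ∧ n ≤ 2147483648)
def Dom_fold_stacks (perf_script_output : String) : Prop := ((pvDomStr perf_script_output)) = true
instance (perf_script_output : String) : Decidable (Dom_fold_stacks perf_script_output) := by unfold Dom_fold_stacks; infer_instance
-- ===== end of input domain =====

-- B replaces A's flush-on-boundary accumulator by an explicit group-then-map decomposition
-- (split lines into records at blank lines, then extract/count each record); objective: alternative.

-- ===== PORT A =====
def pvIsHex (s : String) : Bool := (PySem.Int.ofStrBase? s 16).isSome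

def pvFlushFrames (frames : List String) (dct : PySem.Dict String Int) :
    PySem.Dict String Int × List String :=
  if frames ≠ [] then
    let key := PySem.Str.join ";" frames.reverse
    (dct.insert key (dct.getD key 0 + 1), [])
  else (dct, frames)

def pvStepA (st : PySem.Dict String Int × List String) (line : String) :
    PySem.Dict String Int × List String :=
  let stripped := PySem.Str.strip line
  if stripped = "" then
    pvFlushFrames st.2 st.1
  else if PySem.Str.startswith stripped "(" || PySem.Str.startswith stripped "#" then st
  else
    let parts := PySem.Str.split₀Max stripped 1
    if 2 ≤ parts.length && pvIsHex (parts.getD 0 "") then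
      let raw := PySem.Str.strip (((PySem.Str.split? (parts.getD 1 "") "(").getD []).getD 0 "")
      let symbol := if raw ≠ "" then ((PySem.Str.split? raw "+").getD []).getD 0 "" else parts.getD 0 ""
      (st.1, st.2 ++ [symbol])
    else st

def fold_stacks (perf_script_output : String) : List (String × Int) :=
  let st := (PySem.Str.splitlines perf_script_output).foldl pvStepA (PySem.Dict.empty, [])
  (pvFlushFrames st.2 st.1).1.items

-- ===== PORT B =====
def pvIsHexB (s : String) : Bool := (PySem.Int.ofStrBase? s 16).isSome

def pvSymbolOf (line : String) : Option String :=
  let stripped := PySem.Str.strip line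
  if PySem.Str.startswith stripped "(" || PySem.Str.startswith stripped "#" then none
  else
    let parts := PySem.Str.split₀Max stripped 1
    if 2 ≤ parts.length && pvIsHexB (parts.getD 0 "") then
      let raw := PySem.Str.strip (((PySem.Str.split? (parts.getD 1 "") "(").getD []).getD 0 "")
      some (if raw ≠ "" then ((PySem.Str.split? raw "+").getD []).getD 0 "" else parts.getD 0 "")
    else none

def pvGroupStep (acc : List (List String) × List String) (line : String) :
    List (List String) × List String :=
  if PySem.Str.strip line ≠ "" then (acc.1, acc.2 ++ [line])
  else (acc.1 ++ [acc.2], [])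

def pvFoldRecord (dct : PySem.Dict String Int) (record : List String) : PySem.Dict String Int :=
  let frames := (record.map pvSymbolOf).filterMap id
  if frames ≠ [] then
    let key := PySem.Str.join ";" frames.reverse
    dct.insert key (dct.getD key 0 + 1)
  else dct

def fold_stacks_alt (perf_script_output : String) : List (String × Int) :=
  let g := (PySem.Str.splitlines perf_script_output).foldl pvGroupStep ([], [])
  ((g.1 ++ [g.2]).foldl pvFoldRecord PySem.Dict.empty).items

-- ===== PRECONDITION & SPEC =====
def Spec_fold_stacks (perf_script_output : String) (out : List (String × Int)) : Prop := out = fold_stacks_alt perf_script_output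
instance (perf_script_output : String) (out : List (String × Int)) : Decidable (Spec_fold_stacks perf_script_output out) := by unfold Spec_fold_stacks; infer_instance

-- ===== CLAIM (what is proved, stated in full; the proofs are below) =====
def Claim_equal_fold_stacks : Prop := ∀ (perf_script_output : String), Dom_fold_stacks perf_script_output → Spec_fold_stacks perf_script_output (fold_stacks perf_script_output)

-- ===== LEMMAS AND PROOFS =====

lemma pv_filterMap_id_singleton {α : Type} (o : Option α) : List.filterMap id [o] = o.toList := by
  cases o <;> rfl

-- A's flush of the accumulated symbols of a record equals B's per-record fold body.
lemma pv_flush_eq (cur : List String) (dct : PySem.Dict String Int) :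
    pvFlushFrames ((cur.map pvSymbolOf).filterMap id) dct = (pvFoldRecord dct cur, []) := by
  simp only [pvFlushFrames, pvFoldRecord]
  by_cases h : (cur.map pvSymbolOf).filterMap id = []
  · rw [if_neg (not_not_intro h), if_neg (not_not_intro h), h]
  · rw [if_pos h, if_pos h]

-- On a non-blank line A's step appends pvSymbolOf's result (if any) to the frames.
lemma pv_stepA_nonblank (l : String) (h : ¬ PySem.Str.strip l = "")
    (st : PySem.Dict String Int × List String) :
    pvStepA st l = (st.1, st.2 ++ (pvSymbolOf l).toList) := by
  unfold pvStepA pvSymbolOf pvIsHex pvIsHexB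
  simp only [h, if_false]
  split_ifs <;> simp

lemma pv_main (lines : List String) (dct : PySem.Dict String Int) :
    ∀ (recs : List (List String)) (cur : List String),
      (pvFlushFrames
        (lines.foldl pvStepA (recs.foldl pvFoldRecord dct, (cur.map pvSymbolOf).filterMap id)).2
        (lines.foldl pvStepA (recs.foldl pvFoldRecord dct, (cur.map pvSymbolOf).filterMap id)).1).1
      = ((lines.foldl pvGroupStep (recs, cur)).1 ++ [(lines.foldl pvGroupStep (recs, cur)).2]).foldl
          pvFoldRecord dct := by
  induction lines with
  | nil =>
      intro recs cur
      rw [List.foldl_nil, List.foldl_nil, List.foldl_append, List.foldl_cons, List.foldl_nil]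
      rw [show ((recs.foldl pvFoldRecord dct, (cur.map pvSymbolOf).filterMap id) :
            PySem.Dict String Int × List String).2 = (cur.map pvSymbolOf).filterMap id from rfl]
      rw [pv_flush_eq]
  | cons l ls ih =>
      intro recs cur
      rw [List.foldl_cons, List.foldl_cons]
      by_cases h : PySem.Str.strip l = ""
      · rw [show pvStepA (recs.foldl pvFoldRecord dct, (cur.map pvSymbolOf).filterMap id) l
              = pvFlushFrames ((cur.map pvSymbolOf).filterMap id) (recs.foldl pvFoldRecord dct)
            from by simp only [pvStepA, h, reduceIte]]
        rw [pv_flush_eq]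
        rw [show pvGroupStep (recs, cur) l = (recs ++ [cur], []) from by
              simp only [pvGroupStep, h, ne_eq, not_true_eq_false, reduceIte]]
        have h2 := ih (recs ++ [cur]) []
        rw [List.foldl_append, List.foldl_cons, List.foldl_nil] at h2
        simpa only [List.map_nil, List.filterMap_nil] using h2
      · rw [pv_stepA_nonblank l h]
        rw [show pvGroupStep (recs, cur) l = (recs, cur ++ [l]) from by
              simp only [pvGroupStep, h, ne_eq, not_false_eq_true, reduceIte]]
        have h2 := ih recs (cur ++ [l])
        rw [List.map_append, List.filterMap_append, List.map_cons, List.map_nil,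
            pv_filterMap_id_singleton] at h2
        exact h2

-- ===== VERDICT (by name: the statement is the Claim_ definition above) =====
theorem fold_stacks_spec : Claim_equal_fold_stacks := by
  intro s _
  show fold_stacks s = fold_stacks_alt s
  have h := pv_main (PySem.Str.splitlines s) PySem.Dict.empty [] []
  simp only [List.map_nil, List.filterMap_nil, List.foldl_nil] at h
  exact congrArg PySem.Dict.items h
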